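-- pv_equiv track=rewrite | github.com/lukelookluck/algorithm_exam | 라인 코테/문제1.py | solution
-- ===== SOURCE A (Python) =====
-- def solution(boxes):
--     answer = -1
--     N = len(boxes)
--     temp = []
--     for i in boxes:
--         temp += i
--     b_len = len(temp)
--     temp = set(temp)
--     a_len = len(temp)
--     answer = N - (b_len - a_len)
--
--     return answer
-- ===== SOURCE B (Python) =====
-- def solution(boxes):
--     flat = sorted(x for box in boxes for x in box)
--     dup = sum(1 for a, b in zip(flat, flat[1:]) if a == b)
--     return len(boxes) - dup
-- ===== Notes on version B (the rewrite author's own statement) =====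
-- stated objective: alternative
-- what changed: Sort the flattened elements and count adjacent-equal pairs (each duplicate occurrence sits next to an earlier equal element after sorting), instead of building a hash set and subtracting the set's size from the flattened length.
import Mathlib
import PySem

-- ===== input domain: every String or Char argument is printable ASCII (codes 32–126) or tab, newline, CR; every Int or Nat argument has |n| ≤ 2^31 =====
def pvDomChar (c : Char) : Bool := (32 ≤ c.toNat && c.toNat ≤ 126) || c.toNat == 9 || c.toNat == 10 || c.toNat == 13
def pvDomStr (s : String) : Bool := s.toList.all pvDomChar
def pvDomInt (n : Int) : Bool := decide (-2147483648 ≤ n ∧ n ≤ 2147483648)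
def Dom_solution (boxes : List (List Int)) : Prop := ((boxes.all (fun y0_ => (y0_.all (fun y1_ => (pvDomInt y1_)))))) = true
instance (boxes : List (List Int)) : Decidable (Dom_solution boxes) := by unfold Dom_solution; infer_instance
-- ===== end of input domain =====

-- B sorts the flattened elements and counts adjacent-equal pairs instead of measuring a hash set's size: a different (sort-then-scan) algorithm, same result.


-- ===== PORT A =====
def solution (boxes : List (List Int)) : Int :=
  let N : Int := (boxes.length : Int)
  let temp : List Int := boxes.foldl (fun t i => t ++ i) []
  let b_len : Int := (temp.length : Int)
  let temp2 : PySem.Set Int := PySem.Set.ofList temp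
  let a_len : Int := (temp2.length : Int)
  N - (b_len - a_len)

-- ===== PORT B =====
def solution_alt (boxes : List (List Int)) : Int :=
  -- flat = sorted(x for box in boxes for x in box)
  let flat : List Int := PySem.List.sorted (boxes.flatMap (fun box => box)) (fun x => x) false
  -- dup = sum(1 for a, b in zip(flat, flat[1:]) if a == b)   (flat[1:] = flat.drop 1, exact for a list)
  let dup : Int := (flat.zip (flat.drop 1)).foldl (fun acc p => if p.1 = p.2 then acc + 1 else acc) 0
  (boxes.length : Int) - dup

-- ===== PRECONDITION & SPEC =====
def Spec_solution (boxes : List (List Int)) (out : Int) : Prop := out = solution_alt boxes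
instance (boxes : List (List Int)) (out : Int) : Decidable (Spec_solution boxes out) := by unfold Spec_solution; infer_instance

-- ===== CLAIM (what is proved, stated in full; the proofs are below) =====
def Claim_equal_solution : Prop := ∀ (boxes : List (List Int)), Dom_solution boxes → Spec_solution boxes (solution boxes)

-- ===== LEMMAS AND PROOFS =====

-- number of adjacent equal pairs, the quantity B's zip-fold computes
def pvCntAdj : List Int → Nat
  | [] => 0
  | [_] => 0
  | a :: b :: t => (if a = b then 1 else 0) + pvCntAdj (b :: t)

theorem pv_zipfold_eq_cnt (s : List Int) (acc : Int) :
    (s.zip (s.drop 1)).foldl (fun acc p => if p.1 = p.2 then acc + 1 else acc) acc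
      = acc + (pvCntAdj s : Int) := by
  induction s generalizing acc with
  | nil => simp [pvCntAdj]
  | cons a t ih =>
    cases t with
    | nil => simp [pvCntAdj]
    | cons b t' =>
      simp only [List.drop_succ_cons, List.drop_zero, List.zip_cons_cons, List.foldl_cons]
      rw [show (b :: t').drop 1 = t' from rfl] at ih
      rw [ih]
      by_cases h : a = b
      · simp [pvCntAdj, h]; ring
      · simp [pvCntAdj, h]

-- on a sorted list, adjacent-equal pairs count = length - number of distinct elements
theorem pv_cnt_sorted (s : List Int) (hs : s.Pairwise (· ≤ ·)) :
    pvCntAdj s + s.toFinset.card = s.length := by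
  induction s with
  | nil => simp [pvCntAdj]
  | cons a t ih =>
    cases t with
    | nil => simp [pvCntAdj]
    | cons b t' =>
      have hab : a ≤ b := (List.pairwise_cons.mp hs).1 b (by simp)
      have htl : (b :: t').Pairwise (· ≤ ·) := (List.pairwise_cons.mp hs).2
      have ih' := ih htl
      simp only [List.length_cons] at ih'
      by_cases h : a = b
      · subst h
        have : (a :: a :: t').toFinset = (a :: t').toFinset := by simp
        simp only [pvCntAdj, this, List.length_cons]
        simp only [if_pos]
        omega
      · have hnot : a ∉ b :: t' := by
          intro hmem
          rcases List.mem_cons.mp hmem with h1 | h2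
          · exact h h1
          · have hba : b ≤ a := (List.pairwise_cons.mp htl).1 a h2
            exact h (le_antisymm hab hba)
        rw [show (a :: b :: t').toFinset = insert a (b :: t').toFinset from by simp,
            Finset.card_insert_of_notMem (by simpa using hnot)]
        simp only [pvCntAdj, List.length_cons]
        rw [if_neg h]
        omega

-- A's accumulation 'temp += i' builds exactly the flattened list
theorem pv_flat_eq (boxes : List (List Int)) (t : List Int) :
    boxes.foldl (fun t i => t ++ i) t = t ++ boxes.flatten := by
  induction boxes generalizing t with
  | nil => simp
  | cons b bs ih => simp [List.flatten, ih]

-- |set(l)| = number of distinct elements of l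
theorem pv_ofList_len (l : List Int) :
    (PySem.Set.ofList l).length = l.toFinset.card := by
  have hnd : (PySem.Set.ofList l).Nodup := PySem.Set.nodup_ofList l
  have hfs : (PySem.Set.ofList l).toFinset = l.toFinset := by
    ext x; simp [PySem.Set.mem_ofList]
  rw [← hfs, List.toFinset_card_of_nodup hnd]

-- ===== VERDICT (by name: the statement is the Claim_ definition above) =====
theorem solution_spec : Claim_equal_solution := by
  intro boxes _
  unfold Spec_solution solution solution_alt
  simp only [pv_flat_eq, List.nil_append]
  set flat := boxes.flatten with hflat
  have hfm : boxes.flatMap (fun box => box) = flat := by simp [hflat]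
  rw [hfm, pv_zipfold_eq_cnt]
  set s := PySem.List.sorted flat (fun x => x) false with hs
  have hp : s.Pairwise (· ≤ ·) := by
    have := PySem.List.sorted_pairwise flat (fun x => x)
    simpa [hs] using this
  have hperm : s.Perm flat := PySem.List.sorted_perm flat (fun x => x) false
  have hcnt := pv_cnt_sorted s hp
  have hfs : s.toFinset = flat.toFinset := by
    ext x; simp [hperm.mem_iff]
  rw [hfs] at hcnt
  rw [hperm.length_eq] at hcnt
  rw [pv_ofList_len]
  omega
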